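-- pv_equiv track=rewrite | github.com/LemonATsu/Bridge-Building | train_build_bridge.py | generate_desc
-- ===== SOURCE A (Python) =====
-- START_LINE = "SLLLLLLLLLLLLLLLLLLLLLLLLLLLLLLLLLLLLLLLLLLLLLLLLLLLLLLLLLLLLLLLLLLLLLLLLLLLLLLLLLLLLLLLLLLLLLLLLLLL"
--
-- LAND_LINE  = "LLLLLLLLLLLLLLLLLLLLLLLLLLLLLLLLLLLLLLLLLLLLLLLLLLLLLLLLLLLLLLLLLLLLLLLLLLLLLLLLLLLLLLLLLLLLLLLLLLLL"
--
-- GOAL_LINE  = "LLLLLLLLLLLLLLLLLLLLLLLLLLLLLLLLLLLLLLLLLLLLLLLLLLLLGLLLLLLLLLLLLLLLLLLLLLLLLLLLLLLLLLLLLLLLLLLLLLLL"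
--
-- RIVER_LINE = "RRRRRRRRRRRRRRRRRRRRRRRRRRRRRRRRRRRRRRRRRRRRRRRRRRRRRRRRRRRRRRRRRRRRRRRRRRRRRRRRRRRRRRRRRRRRRRRRRRRR"
--
-- def generate_desc(num_of_river=10):
--     cnt = 0
--     a = [START_LINE]
--
--     for x in range(1, 99):
--         if x > 50 and cnt < num_of_river:
--             cnt += 1
--             a.append(RIVER_LINE)
--         else :
--             a.append(LAND_LINE)
--     a.append(GOAL_LINE)
--     return a
-- ===== SOURCE B (Python) =====
-- START_LINE = "SLLLLLLLLLLLLLLLLLLLLLLLLLLLLLLLLLLLLLLLLLLLLLLLLLLLLLLLLLLLLLLLLLLLLLLLLLLLLLLLLLLLLLLLLLLLLLLLLLLL"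
--
-- LAND_LINE  = "LLLLLLLLLLLLLLLLLLLLLLLLLLLLLLLLLLLLLLLLLLLLLLLLLLLLLLLLLLLLLLLLLLLLLLLLLLLLLLLLLLLLLLLLLLLLLLLLLLLL"
--
-- GOAL_LINE  = "LLLLLLLLLLLLLLLLLLLLLLLLLLLLLLLLLLLLLLLLLLLLLLLLLLLLGLLLLLLLLLLLLLLLLLLLLLLLLLLLLLLLLLLLLLLLLLLLLLLL"
--
-- RIVER_LINE = "RRRRRRRRRRRRRRRRRRRRRRRRRRRRRRRRRRRRRRRRRRRRRRRRRRRRRRRRRRRRRRRRRRRRRRRRRRRRRRRRRRRRRRRRRRRRRRRRRRRR"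
--
-- def generate_desc(num_of_river=10):
--     r = min(48, max(0, num_of_river))
--     return [START_LINE] + [LAND_LINE] * 50 + [RIVER_LINE] * r + [LAND_LINE] * (48 - r) + [GOAL_LINE]
-- ===== Notes on version B (the rewrite author's own statement) =====
-- stated objective: simpler
-- what changed: Replaced A's per-index loop with its branch and counter by clamping the river count in closed form and concatenating bulk-repeated line blocks.
import Mathlib
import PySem

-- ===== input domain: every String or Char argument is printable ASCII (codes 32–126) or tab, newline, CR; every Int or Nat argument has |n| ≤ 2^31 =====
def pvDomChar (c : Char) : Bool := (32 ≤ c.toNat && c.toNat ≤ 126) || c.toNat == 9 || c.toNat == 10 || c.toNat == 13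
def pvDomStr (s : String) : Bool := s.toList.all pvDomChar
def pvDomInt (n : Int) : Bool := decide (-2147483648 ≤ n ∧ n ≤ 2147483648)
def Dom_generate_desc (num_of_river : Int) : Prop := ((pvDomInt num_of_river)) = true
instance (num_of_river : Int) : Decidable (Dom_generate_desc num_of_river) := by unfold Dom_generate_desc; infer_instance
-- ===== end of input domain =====

-- B replaces A's per-index loop with its branch and counter by clamping the river count
-- in closed form and concatenating bulk-repeated line blocks (simpler).

def START_LINE : String := "SLLLLLLLLLLLLLLLLLLLLLLLLLLLLLLLLLLLLLLLLLLLLLLLLLLLLLLLLLLLLLLLLLLLLLLLLLLLLLLLLLLLLLLLLLLLLLLLLLLL"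
def LAND_LINE  : String := "LLLLLLLLLLLLLLLLLLLLLLLLLLLLLLLLLLLLLLLLLLLLLLLLLLLLLLLLLLLLLLLLLLLLLLLLLLLLLLLLLLLLLLLLLLLLLLLLLLLL"
def GOAL_LINE  : String := "LLLLLLLLLLLLLLLLLLLLLLLLLLLLLLLLLLLLLLLLLLLLLLLLLLLLGLLLLLLLLLLLLLLLLLLLLLLLLLLLLLLLLLLLLLLLLLLLLLLL"
def RIVER_LINE : String := "RRRRRRRRRRRRRRRRRRRRRRRRRRRRRRRRRRRRRRRRRRRRRRRRRRRRRRRRRRRRRRRRRRRRRRRRRRRRRRRRRRRRRRRRRRRRRRRRRRRR"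

-- ===== PORT A =====
-- loop body of A: state = (cnt, a)
def pvStepA (num_of_river : Int) (s : Int × List String) (x : Int) : Int × List String :=
  if x > 50 ∧ s.1 < num_of_river then (s.1 + 1, s.2 ++ [RIVER_LINE]) else (s.1, s.2 ++ [LAND_LINE])

def generate_desc (num_of_river : Int) : List String :=
  let s := (PySem.List.pyRange 1 99 1).foldl (pvStepA num_of_river) (0, [START_LINE])
  s.2 ++ [GOAL_LINE]

-- ===== PORT B =====
def generate_desc_alt (num_of_river : Int) : List String :=
  let r : Int := min 48 (max 0 num_of_river)
  [START_LINE] ++ List.replicate 50 LAND_LINE ++ List.replicate r.toNat RIVER_LINE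
    ++ List.replicate (48 - r).toNat LAND_LINE ++ [GOAL_LINE]

-- ===== PRECONDITION & SPEC =====
def Spec_generate_desc (num_of_river : Int) (out : List String) : Prop := out = generate_desc_alt num_of_river
instance (num_of_river : Int) (out : List String) : Decidable (Spec_generate_desc num_of_river out) := by unfold Spec_generate_desc; infer_instance

-- ===== CLAIM (what is proved, stated in full; the proofs are below) =====
def Claim_equal_generate_desc : Prop := ∀ (num_of_river : Int), Dom_generate_desc num_of_river → Spec_generate_desc num_of_river (generate_desc num_of_river)

-- ===== LEMMAS AND PROOFS =====

-- over indices ≤ 50 the loop always appends LAND_LINE and leaves cnt unchanged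
theorem land_fold (n : Int) : ∀ (l : List Int), (∀ x ∈ l, ¬ 50 < x) → ∀ (cnt : Int) (acc : List String),
    l.foldl (pvStepA n) (cnt, acc) = (cnt, acc ++ List.replicate l.length LAND_LINE) := by
  intro l
  induction l with
  | nil => intro _ cnt acc; simp
  | cons x t ih =>
    intro h cnt acc
    have hx : ¬ 50 < x := h x List.mem_cons_self
    rw [List.foldl_cons,
        show pvStepA n (cnt, acc) x = (cnt, acc ++ [LAND_LINE]) from by simp [pvStepA, hx],
        ih (fun y hy => h y (List.mem_cons_of_mem _ hy)) cnt (acc ++ [LAND_LINE])]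
    simp [List.replicate_succ]

-- over indices > 50 the loop appends RIVER_LINE while cnt < n, then LAND_LINE
theorem river_fold (n : Int) : ∀ (l : List Int), (∀ x ∈ l, 50 < x) → ∀ (cnt : Int) (acc : List String),
    (l.foldl (pvStepA n) (cnt, acc)).2 =
      acc ++ List.replicate (min l.length (n - cnt).toNat) RIVER_LINE
          ++ List.replicate (l.length - min l.length (n - cnt).toNat) LAND_LINE := by
  intro l
  induction l with
  | nil => intro _ cnt acc; simp
  | cons x t ih =>
    intro h cnt acc
    have hx : 50 < x := h x List.mem_cons_self
    have ht : ∀ y ∈ t, 50 < y := fun y hy => h y (List.mem_cons_of_mem _ hy)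
    by_cases hc : cnt < n
    · have h1 : min (t.length + 1) (n - cnt).toNat = min t.length (n - (cnt + 1)).toNat + 1 := by omega
      have h2 : t.length + 1 - min (t.length + 1) (n - cnt).toNat
              = t.length - min t.length (n - (cnt + 1)).toNat := by omega
      rw [List.foldl_cons,
          show pvStepA n (cnt, acc) x = (cnt + 1, acc ++ [RIVER_LINE]) from by
            simp [pvStepA, hx, hc],
          ih ht (cnt + 1) (acc ++ [RIVER_LINE])]
      simp only [List.length_cons, h1, List.replicate_succ]
      simp [List.append_assoc]
    · have h0 : (n - cnt).toNat = 0 := by omega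
      rw [List.foldl_cons,
          show pvStepA n (cnt, acc) x = (cnt, acc ++ [LAND_LINE]) from by simp [pvStepA, hc],
          ih ht cnt (acc ++ [LAND_LINE])]
      simp only [List.length_cons, h0, Nat.min_zero, Nat.sub_zero, List.replicate_succ]
      simp [List.append_assoc]

-- ===== VERDICT (by name: the statement is the Claim_ definition above) =====
theorem generate_desc_spec : Claim_equal_generate_desc := by
  intro n _
  show ((PySem.List.pyRange 1 99 1).foldl (pvStepA n) (0, [START_LINE])).2 ++ [GOAL_LINE]
     = [START_LINE] ++ List.replicate 50 LAND_LINE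
        ++ List.replicate (min 48 (max 0 n)).toNat RIVER_LINE
        ++ List.replicate ((48 : Int) - min 48 (max 0 n)).toNat LAND_LINE ++ [GOAL_LINE]
  rw [show PySem.List.pyRange 1 99 1 = PySem.List.pyRange 1 51 1 ++ PySem.List.pyRange 51 99 1 from by decide,
      List.foldl_append,
      land_fold n (PySem.List.pyRange 1 51 1) (by decide) 0 [START_LINE],
      river_fold n (PySem.List.pyRange 51 99 1) (by decide) 0 _]
  have hlen : (PySem.List.pyRange 1 51 1).length = 50 := by decide
  have hlen2 : (PySem.List.pyRange 51 99 1).length = 48 := by decide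
  have e1 : (min (48 : Int) (max 0 n)).toNat = min 48 (n - 0).toNat := by omega
  have e2 : ((48 : Int) - min 48 (max 0 n)).toNat = 48 - min 48 (n - 0).toNat := by omega
  rw [hlen, hlen2, e1, e2]
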